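-- pv_equiv track=rewrite | github.com/pypi-data/pypi-mirror-321 | packages/pfmongo/pfmongo-0.9.152.tar.gz/pfmongo-0.9.152/pfmongo/commands/fop/ls.py | columns_format
-- ===== SOURCE A (Python) =====
-- def columns_format(items: list[str], terminal_width: int) -> list[str]:
--     """
--     Format the given items into columns that fit the terminal width.
--
--     Args:
--         items (list[str]): List of strings to format.
--         terminal_width (int): Width of the terminal in characters.
--
--     Returns:
--         list[str]: List of formatted strings, each representing a row.
--     """
--     max_item_width: int = max(len(item) for item in items)
--     column_width: int = max_item_width + 2  # Add 2 for spacing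
--
--     num_columns: int = max(1, terminal_width // column_width)
--     num_rows: int = (len(items) + num_columns - 1) // num_columns
--
--     rows: list[str] = []
--     for row in range(num_rows):
--         row_items: list[str] = items[row::num_rows]
--         formatted_row: str = "".join(
--             item.ljust(column_width) for item in row_items
--         ).rstrip()
--         rows.append(formatted_row)
--
--     return rows
-- ===== SOURCE B (Python) =====
-- def columns_format(items: list[str], terminal_width: int) -> list[str]:
--     column_width = max(len(item) for item in items) + 2
--     num_columns = max(1, terminal_width // column_width)
--     num_rows = (len(items) + num_columns - 1) // num_columns
--     padded = [item.ljust(column_width) for item in items]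
--     rows = [""] * num_rows
--     for i, cell in enumerate(padded):
--         rows[i % num_rows] += cell
--     return [row.rstrip() for row in rows]
-- ===== Notes on version B (the rewrite author's own statement) =====
-- stated objective: alternative
-- what changed: B pads all items once up front, then scatters each padded cell into its row string by string concatenation in one enumerate pass (rows[i % num_rows] += cell) and rstrips at the end, instead of gathering each row with a strided slice items[row::num_rows] and joining per row.
-- outside the precondition, e.g. on columns_format([], 80): A raises ValueError, B raises ValueError
import Mathlib
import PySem

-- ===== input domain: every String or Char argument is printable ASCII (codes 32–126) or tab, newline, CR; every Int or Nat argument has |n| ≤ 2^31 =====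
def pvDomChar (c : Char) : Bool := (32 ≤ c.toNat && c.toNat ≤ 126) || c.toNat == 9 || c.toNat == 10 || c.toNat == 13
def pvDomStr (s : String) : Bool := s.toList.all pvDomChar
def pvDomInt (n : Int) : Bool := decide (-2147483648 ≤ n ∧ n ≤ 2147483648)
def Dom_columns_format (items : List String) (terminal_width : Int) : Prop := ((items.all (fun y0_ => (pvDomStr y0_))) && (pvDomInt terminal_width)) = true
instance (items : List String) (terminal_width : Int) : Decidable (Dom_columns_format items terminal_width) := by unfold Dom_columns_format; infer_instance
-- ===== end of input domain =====

-- B pads every item once up front and scatters each padded cell into its row string in one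
-- enumerate pass, rstripping at the end, instead of gathering each row with a strided slice
-- and joining per row; same complexity, different decomposition (objective: alternative).

-- ===== PORT A =====
-- Python's str.ljust: pad with spaces to width, no-op if already that wide (exact)
def pyLjust (s : String) (w : Int) : String :=
  String.ofList (s.toList ++ List.replicate (w.toNat - s.toList.length) ' ')

def columns_format (items : List String) (terminal_width : Int) : List String :=
  match PySem.List.max? (items.map (fun item => PySem.Str.len item)) (fun x => x) with
  | none => []  -- Python's max() raises ValueError on empty items; excluded by Pre_
  | some max_item_width =>
    let column_width : Int := max_item_width + 2
    let num_columns : Int := max 1 (PySem.Int.floordiv terminal_width column_width)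
    let num_rows : Int := PySem.Int.floordiv ((items.length : Int) + num_columns - 1) num_columns
    (PySem.List.pyRange 0 num_rows 1).foldl
      (fun rows row =>
        let row_items : List String :=
          (PySem.List.slice? items (some row) none num_rows).getD []
        let formatted_row : String :=
          PySem.Str.rstrip (PySem.Str.join "" (row_items.map (fun item => pyLjust item column_width)))
        rows ++ [formatted_row]) []

-- ===== PORT B =====
-- item.ljust(column_width) at the code-point level (exact)
def pvPad (s : String) (w : Int) : List Char :=
  s.toList ++ List.replicate (w.toNat - s.toList.length) ' '

def columns_format_alt (items : List String) (terminal_width : Int) : List String :=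
  match PySem.List.max? (items.map (fun item => PySem.Str.len item)) (fun x => x) with
  | none => []  -- max() raises ValueError on empty items in B too; excluded by Pre_
  | some m =>
    let column_width : Int := m + 2
    let num_columns : Int := max 1 (PySem.Int.floordiv terminal_width column_width)
    let num_rows : Int := PySem.Int.floordiv ((items.length : Int) + num_columns - 1) num_columns
    let padded : List (List Char) := items.map (fun item => pvPad item column_width)
    let rows0 : List (List Char) := List.replicate num_rows.toNat []
    let rows : List (List Char) :=
      (PySem.List.enumerate padded 0).foldl
        (fun g p => g.modify ((PySem.Int.mod p.1 num_rows).toNat) (fun b => b ++ p.2)) rows0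
    rows.map (fun row => String.ofList (PySem.Chars.rstrip row))

-- ===== PRECONDITION & SPEC =====
-- Pre_ excludes only the empty items list, on which A raises ValueError (max() of an empty sequence);
-- B raises the same way there.
def Pre_columns_format (items : List String) (terminal_width : Int) : Prop := items ≠ []
instance (items : List String) (terminal_width : Int) : Decidable (Pre_columns_format items terminal_width) := by unfold Pre_columns_format; infer_instance
def pvWitness_columns_format : List String × Int := (["ab", "c"], 10)

def Spec_columns_format (items : List String) (terminal_width : Int) (out : List String) : Prop := out = columns_format_alt items terminal_width
instance (items : List String) (terminal_width : Int) (out : List String) : Decidable (Spec_columns_format items terminal_width out) := by unfold Spec_columns_format; infer_instance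

-- ===== CLAIM (what is proved, stated in full; the proofs are below) =====
def Claim_equal_columns_format : Prop := ∀ (items : List String) (terminal_width : Int), Dom_columns_format items terminal_width → Pre_columns_format items terminal_width → Spec_columns_format items terminal_width (columns_format items terminal_width)

-- ===== LEMMAS AND PROOFS =====

-- A's row r: the items whose index is ≡ r (mod N), in order.
def pvStride (xs : List String) (N r : Nat) : List String :=
  ((List.range xs.length).filter (fun i => i % N == r)).map (fun i => xs.getD i "")

-- B's row r before rstrip: the padded cells whose index is ≡ r (mod N), in order.
def pvStrideC (xs : List (List Char)) (N r : Nat) : List (List Char) :=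
  ((List.range xs.length).filter (fun i => i % N == r)).map (fun i => xs.getD i [])

theorem pvStrideC_snoc (xs : List (List Char)) (x : List Char) (N r : Nat) :
    pvStrideC (xs ++ [x]) N r =
      pvStrideC xs N r ++ (if xs.length % N = r then [x] else []) := by
  unfold pvStrideC
  rw [List.length_append, List.length_singleton, List.range_succ, List.filter_append,
    List.map_append]
  congr 1
  · exact List.map_congr_left fun i hi => by
      have : i < xs.length := List.mem_range.mp (List.mem_filter.mp hi).1
      exact List.getD_append _ _ _ _ this
  · by_cases h : xs.length % N = r
    · simp [h]
    · simp [h]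

theorem pvStrideC_map (f : String → List Char) (xs : List String) (N r : Nat) :
    pvStrideC (xs.map f) N r = (pvStride xs N r).map f := by
  unfold pvStrideC pvStride
  rw [List.length_map, List.map_map]
  refine List.map_congr_left fun i hi => ?_
  have h : i < xs.length := List.mem_range.mp (List.mem_filter.mp hi).1
  rw [Function.comp_apply, List.getD_eq_getElem _ _ (by simpa using h),
    List.getD_eq_getElem _ _ h, List.getElem_map]

theorem pv_foldl_snoc {α β : Type} (g : α → β) (l : List α) (acc : List β) :
    l.foldl (fun rows row => rows ++ [g row]) acc = acc ++ l.map g := by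
  induction l generalizing acc with
  | nil => simp
  | cons x t ih => simp [List.foldl, ih]

theorem pv_filterMap_eq_map {α β : Type} (f : α → Option β) (g : α → β) (l : List α)
    (h : ∀ a ∈ l, f a = some (g a)) : l.filterMap f = l.map g := by
  induction l with
  | nil => rfl
  | cons x t ih =>
    rw [List.filterMap_cons, h x (List.mem_cons_self), List.map_cons,
      ih fun a ha => h a (List.mem_cons_of_mem _ ha)]

-- ceiling-count arithmetic for the arithmetic-progression lemma
theorem pv_cnt_succ (N r L : Nat) (hN : 0 < N) (hr : r < N) :
    (L + 1 - r + N - 1) / N = (L - r + N - 1) / N + (if L % N = r then 1 else 0) ∧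
      (L % N = r → r + N * ((L - r + N - 1) / N) = L) := by
  rcases Nat.lt_or_ge L r with h | h
  · have hne : ¬ (L % N = r) := by
      rw [Nat.mod_eq_of_lt (lt_trans h hr)]; omega
    have h1 : L - r + N - 1 = N - 1 := by omega
    have h2 : L + 1 - r + N - 1 = N - 1 := by omega
    rw [h1, h2]
    simp [hne]
  · set d := L - r with hd
    have hL : L = r + d := by omega
    set e := d % N with he'
    set p := d / N with hp'
    have hdm : N * p + e = d := Nat.div_add_mod d N
    have he : e < N := Nat.mod_lt _ hN
    have h1 : L % N = (r + e) % N := by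
      conv_lhs => rw [hL]
      rw [Nat.add_mod, Nat.mod_eq_of_lt hr, ← he']
    have hmod : L % N = r ↔ e = 0 := by
      rcases Nat.lt_or_ge (r + e) N with hre | hge
      · rw [h1, Nat.mod_eq_of_lt hre]; omega
      · have h2 : (r + e) % N = r + e - N := by
          rw [Nat.mod_eq_sub_mod hge, Nat.mod_eq_of_lt (by omega)]
        rw [h1, h2]; omega
    constructor
    · by_cases he0 : e = 0
      · have hc1 : (L - r + N - 1) / N = p := by
          rw [show L - r + N - 1 = N * p + (N - 1) by omega, Nat.mul_add_div hN,
            Nat.div_eq_of_lt (by omega)]; omega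
        have hc2 : (L + 1 - r + N - 1) / N = p + 1 := by
          rw [show L + 1 - r + N - 1 = N * p + N by omega, Nat.mul_add_div hN, Nat.div_self hN]
        rw [hc1, hc2, if_pos (hmod.mpr he0)]
      · have hc1 : (L - r + N - 1) / N = p + 1 := by
          rw [show L - r + N - 1 = N * p + (e - 1 + N) by omega, Nat.mul_add_div hN,
            Nat.add_div_right _ hN, Nat.div_eq_of_lt (by omega)]
        have hc2 : (L + 1 - r + N - 1) / N = p + 1 := by
          rw [show L + 1 - r + N - 1 = N * p + (e + N) by omega, Nat.mul_add_div hN,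
            Nat.add_div_right _ hN, Nat.div_eq_of_lt he]
        rw [hc1, hc2, if_neg (fun hh => he0 (hmod.mp hh))]
    · intro hh
      have he0 := hmod.mp hh
      have hc1 : (L - r + N - 1) / N = p := by
        rw [show L - r + N - 1 = N * p + (N - 1) by omega, Nat.mul_add_div hN,
          Nat.div_eq_of_lt (by omega)]; omega
      rw [hc1]; omega

-- AP lemma: the indices < L congruent to r mod N form an arithmetic progression
theorem pv_filter_range_mod (N r : Nat) (hN : 0 < N) (hr : r < N) (L : Nat) :
    (List.range L).filter (fun i => i % N == r) =
      (List.range ((L - r + N - 1) / N)).map (fun k => r + N * k) := by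
  induction L with
  | zero =>
    have h0 : (0 - r + N - 1) / N = 0 := Nat.div_eq_of_lt (by omega)
    rw [h0]
    simp
  | succ L ih =>
    obtain ⟨h1, h2⟩ := pv_cnt_succ N r L hN hr
    rw [List.range_succ, List.filter_append, ih, h1]
    by_cases hLr : L % N = r
    · rw [if_pos hLr, List.range_succ, List.map_append]
      congr 1
      simp [hLr, h2 hLr]
    · rw [if_neg hLr]
      simp [hLr]

theorem pv_slice_eq_stride (xs : List String) (N r : Nat) (hN : 0 < N) (hr : r < N)
    (hNL : N ≤ xs.length) :
    (PySem.List.slice? xs (some (r : Int)) none (N : Int)).getD [] = pvStride xs N r := by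
  have hL : r < xs.length := lt_of_lt_of_le hr hNL
  have hN0 : ¬((N : Int) = 0) := by omega
  have hNneg : ¬((N : Int) < 0) := by omega
  have hrneg : ¬((r : Int) < 0) := by omega
  have hNpos : (0 : Int) < (N : Int) := by omega
  have hmin : min (r : Int) (xs.length : Int) = (r : Int) := min_eq_left (by omega)
  have hrL : (r : Int) < (xs.length : Int) := by omega
  simp only [PySem.List.slice?, PySem.List.sliceIndices, if_neg hN0, if_neg hNneg,
    if_neg hrneg, hmin, if_pos hNpos, if_pos hrL]
  have hcnt : (((xs.length : Int) - r + N - 1) / N).toNat = (xs.length - r + N - 1) / N := by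
    rw [show ((xs.length : Int) - r + N - 1) = ((xs.length - r + N - 1 : Nat) : Int) by omega]
    rw [← Int.natCast_div, Int.toNat_natCast]
  rw [hcnt, Option.getD_some]
  set cnt := (xs.length - r + N - 1) / N with hcntdef
  have hbound : ∀ k, k < cnt → r + N * k < xs.length := by
    intro k hk
    have hA : (k + 1) * N ≤ cnt * N := Nat.mul_le_mul_right N hk
    have hB : cnt * N ≤ xs.length - r + N - 1 := Nat.div_mul_le_self _ _
    have hC : N * k = k * N := Nat.mul_comm _ _
    rw [Nat.succ_mul] at hA
    omega
  rw [pv_filterMap_eq_map _ (fun k => xs.getD (r + N * k) "") _ ?_]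
  · unfold pvStride
    rw [pv_filter_range_mod N r hN hr, List.map_map]
    rfl
  · intro k hk
    have hkc : k < cnt := List.mem_range.mp hk
    have hidx : ((r : Int) + (N : Int) * (k : Int)).toNat = r + N * k := by
      rw [show ((r : Int) + (N : Int) * (k : Int)) = ((r + N * k : Nat) : Int) by push_cast; ring]
      exact Int.toNat_natCast _
    rw [hidx, List.getElem?_eq_getElem (hbound k hkc)]
    exact congrArg some ((List.getD_eq_getElem xs "" (hbound k hkc)).symm)

-- B's scatter loop builds exactly the flattened strides
theorem pv_rows_eq (N : Nat) (xs : List (List Char)) :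
    (PySem.List.enumerate xs 0).foldl
        (fun g p => g.modify ((PySem.Int.mod p.1 (N : Int)).toNat) (fun b => b ++ p.2))
        (List.replicate N []) =
      (List.range N).map (fun r => (pvStrideC xs N r).flatten) := by
  induction xs using List.reverseRecOn with
  | nil =>
    rw [PySem.List.enumerate_nil, List.foldl_nil]
    symm
    rw [show (fun r => (pvStrideC ([] : List (List Char)) N r).flatten) = fun _ => ([] : List Char)
        from funext fun r => by simp [pvStrideC]]
    simp
  | append_singleton xs x ih =>
    rw [PySem.List.enumerate_append, List.foldl_append, ih, PySem.List.enumerate_cons,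
      PySem.List.enumerate_nil]
    have hmod : PySem.Int.mod ((0 : Int) + (xs.length : Int)) (N : Int) = ((xs.length % N : Nat) : Int) := by
      rw [zero_add, PySem.Int.mod, ← Int.ofNat_fmod]
    apply List.ext_getElem
    · simp
    · intro j h1 h2
      simp only [List.foldl_cons, List.foldl_nil, hmod, Int.toNat_natCast]
      rw [List.getElem_modify]
      simp only [List.getElem_map, List.getElem_range]
      rw [pvStrideC_snoc]
      by_cases h : xs.length % N = j <;> simp [h]

-- join-with-empty-separator is flatten
theorem pv_join_nil_sep (parts : List (List Char)) :
    PySem.Chars.join [] parts = parts.flatten := by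
  show (List.intersperse ([] : List Char) parts).flatten = parts.flatten
  induction parts with
  | nil => rfl
  | cons x t ih =>
    cases t with
    | nil => rfl
    | cons y u => simp [List.intersperse] at ih ⊢; exact ih

-- A's per-row formatting equals B's
theorem pv_row_eq (l : List String) (cw : Int) :
    PySem.Str.rstrip (PySem.Str.join "" (l.map (fun item => pyLjust item cw))) =
      String.ofList (PySem.Chars.rstrip ((l.map (fun s => pvPad s cw)).flatten)) := by
  conv_lhs => rw [← String.ofList_toList (s := PySem.Str.rstrip _)]
  rw [PySem.Str.toList_rstrip, PySem.Str.toList_join]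
  congr 2
  rw [show ("" : String).toList = [] from rfl, pv_join_nil_sep, List.map_map]
  exact congrArg _ (List.map_congr_left fun s _ => by
    simp [pyLjust, pvPad, String.toList_ofList])

theorem columns_format_spec : Claim_equal_columns_format := by
  intro items tw _ hpre
  unfold Spec_columns_format
  cases items with
  | nil => exact absurd rfl hpre
  | cons i0 is =>
    unfold columns_format columns_format_alt
    simp only [List.map_cons, PySem.List.max?_id_cons]
    set m := (is.map (fun item => PySem.Str.len item)).foldl max (PySem.Str.len i0) with hm
    set cw : Int := m + 2 with hcw
    set nc : Int := max 1 (PySem.Int.floordiv tw cw) with hnc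
    set L := (i0 :: is).length with hLdef
    have hL1 : 1 ≤ L := by simp [hLdef]
    have hnc1 : 1 ≤ nc := le_max_left _ _
    set ncn := nc.toNat with hncn'
    have hncn : nc = (ncn : Int) := (Int.toNat_of_nonneg (by omega)).symm
    have hncnpos : 0 < ncn := by omega
    set Nn := (L + ncn - 1) / ncn with hNn
    have hnr : PySem.Int.floordiv ((L : Int) + nc - 1) nc = (Nn : Int) := by
      rw [hncn, show ((L : Int) + (ncn : Int) - 1) = ((L + ncn - 1 : Nat) : Int) by omega]
      rw [PySem.Int.floordiv, ← Int.ofNat_fdiv]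
    have hN1 : 1 ≤ Nn := (Nat.one_le_div_iff hncnpos).mpr (by omega)
    have hNL : Nn ≤ L := by
      have h1 : Nn < L + 1 ↔ L + ncn - 1 < (L + 1) * ncn := Nat.div_lt_iff_lt_mul hncnpos
      have h2 : L * 1 ≤ L * ncn := Nat.mul_le_mul_left L hncnpos
      have h3 : (L + 1) * ncn = L * ncn + ncn := by ring
      omega
    rw [hnr]
    have hrange : PySem.List.pyRange 0 (Nn : Int) 1 = (List.range Nn).map (fun k => ((k : Nat) : Int)) := by
      rw [PySem.List.pyRange_one]
      simp
    rw [hrange, pv_foldl_snoc, List.nil_append, List.map_map]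
    have hcons : pvPad i0 cw :: is.map (fun item => pvPad item cw) =
        (i0 :: is).map (fun item => pvPad item cw) := rfl
    rw [Int.toNat_natCast, hcons,
      pv_rows_eq Nn ((i0 :: is).map (fun item => pvPad item cw)), List.map_map]
    simp only [Function.comp_def]
    apply List.map_congr_left
    intro k hk
    have hkN : k < Nn := List.mem_range.mp hk
    rw [pv_slice_eq_stride (i0 :: is) Nn k (by omega) hkN (hLdef ▸ hNL),
      pvStrideC_map (fun item => pvPad item cw) (i0 :: is) Nn k]
    exact pv_row_eq (pvStride (i0 :: is) Nn k) cw
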